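-- pv_equiv track=rewrite | github.com/Nazacodes/fyp-swarm-engine | src/messaging.py | _topic_match
-- ===== SOURCE A (Python) =====
-- def _topic_match(pattern: str, topic: str) -> bool:
--     p_parts = pattern.split(".")
--     t_parts = topic.split(".")
--     i = 0
--     j = 0
--     while i < len(p_parts) and j < len(t_parts):
--         if p_parts[i] == "#":
--             return True
--         if p_parts[i] == "*":
--             i += 1
--             j += 1
--             continue
--         if p_parts[i] != t_parts[j]:
--             return False
--         i += 1
--         j += 1
--     if i == len(p_parts) and j == len(t_parts):
--         return True
--     return i < len(p_parts) and p_parts[i] == "#"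
-- ===== SOURCE B (Python) =====
-- def _topic_match(pattern: str, topic: str) -> bool:
--     p_parts = pattern.split(".")
--     t_parts = topic.split(".")
--     if "#" in p_parts:
--         h = p_parts.index("#")
--         return len(t_parts) >= h and all(
--             pp == "*" or pp == tp for pp, tp in zip(p_parts[:h], t_parts[:h])
--         )
--     return len(p_parts) == len(t_parts) and all(
--         pp == "*" or pp == tp for pp, tp in zip(p_parts, t_parts)
--     )
-- ===== Notes on version B (the rewrite author's own statement) =====
-- stated objective: alternative
-- what changed: Replaces A's stepwise two-pointer loop with early returns by first locating the first '#' in the pattern parts and then doing a single shaped prefix check (length test plus all over a zip of slices).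
import Mathlib
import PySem

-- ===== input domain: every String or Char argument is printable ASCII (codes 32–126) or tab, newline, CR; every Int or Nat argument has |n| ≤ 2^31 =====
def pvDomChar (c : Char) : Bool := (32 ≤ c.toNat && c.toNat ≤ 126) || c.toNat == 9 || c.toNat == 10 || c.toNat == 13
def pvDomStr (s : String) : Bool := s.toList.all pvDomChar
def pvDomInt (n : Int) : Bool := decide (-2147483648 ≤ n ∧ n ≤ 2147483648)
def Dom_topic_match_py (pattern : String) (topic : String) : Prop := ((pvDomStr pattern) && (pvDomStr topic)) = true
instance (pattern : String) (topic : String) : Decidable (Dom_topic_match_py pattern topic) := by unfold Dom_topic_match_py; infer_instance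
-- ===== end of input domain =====

-- B replaces A's stepwise two-pointer loop by locating the first '#' in the pattern
-- parts and doing one shaped prefix check (objective: alternative decomposition).

-- s.split(".") — the separator "." is nonempty, so split? is always some; getD totalizes
def pvSplitDot (s : String) : List String := (PySem.Str.split? s ".").getD []

-- ===== PORT A =====
-- A's while loop: i and j always advance together, so it is the structural recursion
-- on both part lists at once; the post-loop returns are the base cases.
def pvALoop : List String → List String → Bool
  | [], [] => true                       -- i == len(p_parts) and j == len(t_parts)
  | [], _ :: _ => false                  -- i == len(p_parts), j < len(t_parts): 'i < len(p_parts)' fails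
  | p :: _, [] => p == "#"               -- j == len(t_parts): return i < len(p_parts) and p_parts[i] == "#"
  | p :: ps, t :: ts =>
      if p == "#" then true
      else if p == "*" then pvALoop ps ts
      else if p != t then false
      else pvALoop ps ts

def topic_match_py (pattern : String) (topic : String) : Bool :=
  pvALoop (pvSplitDot pattern) (pvSplitDot topic)

-- ===== PORT B =====
-- all(pp == '*' or pp == tp for pp, tp in zip(·, ·))
def pvBAll (p t : List String) : Bool :=
  (p.zip t).all (fun x => x.1 == "*" || x.1 == x.2)

-- '"#" in p' / 'p.index("#")' captured together by index?
def pvBCore (p t : List String) : Bool :=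
  match PySem.List.index? p "#" with
  | some h => decide (t.length ≥ h) && pvBAll (p.take h) (t.take h)
  | none => (p.length == t.length) && pvBAll p t

def topic_match_py_alt (pattern : String) (topic : String) : Bool :=
  pvBCore (pvSplitDot pattern) (pvSplitDot topic)

-- ===== PRECONDITION & SPEC =====
def Spec_topic_match_py (pattern : String) (topic : String) (out : Bool) : Prop := out = topic_match_py_alt pattern topic
instance (pattern : String) (topic : String) (out : Bool) : Decidable (Spec_topic_match_py pattern topic out) := by unfold Spec_topic_match_py; infer_instance

-- ===== CLAIM (what is proved, stated in full; the proofs are below) =====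
def Claim_equal_topic_match_py : Prop := ∀ (pattern : String) (topic : String), Dom_topic_match_py pattern topic → Spec_topic_match_py pattern topic (topic_match_py pattern topic)

-- ===== LEMMAS AND PROOFS =====

lemma pvMain (p t : List String) : pvALoop p t = pvBCore p t := by
  induction p generalizing t with
  | nil =>
    cases t with
    | nil => simp [pvALoop, pvBCore, PySem.List.index?_eq_idxOf?, pvBAll]
    | cons t0 ts => simp [pvALoop, pvBCore, PySem.List.index?_eq_idxOf?, pvBAll]
  | cons p0 ps ih =>
    by_cases h0 : p0 = "#"
    · subst h0
      cases t with
      | nil => simp [pvALoop, pvBCore, PySem.List.index?_eq_idxOf?, List.idxOf?_cons, pvBAll]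
      | cons t0 ts => simp [pvALoop, pvBCore, PySem.List.index?_eq_idxOf?, List.idxOf?_cons, pvBAll]
    · have hix : List.idxOf? "#" (p0 :: ps) = (List.idxOf? "#" ps).map (· + 1) := by
        simp [List.idxOf?_cons, h0]
      cases t with
      | nil =>
        rw [show pvALoop (p0 :: ps) [] = (p0 == "#") from rfl]
        rw [pvBCore, PySem.List.index?_eq_idxOf?, hix]
        cases hk : List.idxOf? "#" ps with
        | none => simp [pvBAll, h0]
        | some k => simp [pvBAll, h0]
      | cons t0 ts =>
        rw [pvALoop]
        simp only [beq_iff_eq, h0, if_false]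
        by_cases h1 : p0 = "*"
        · subst h1
          simp only [if_true, ih ts]
          rw [pvBCore, pvBCore, PySem.List.index?_eq_idxOf?, PySem.List.index?_eq_idxOf?, hix]
          cases hk : List.idxOf? "#" ps with
          | none => simp [pvBAll]
          | some k => simp [pvBAll]
        · simp only [h1, if_false, bne_iff_ne, ne_eq, ite_not]
          by_cases h2 : p0 = t0
          · subst h2
            simp only [ih ts]
            rw [pvBCore, pvBCore, PySem.List.index?_eq_idxOf?, PySem.List.index?_eq_idxOf?, hix]
            cases hk : List.idxOf? "#" ps with
            | none => simp [pvBAll]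
            | some k => simp [pvBAll]
          · simp only [if_neg h2]
            rw [pvBCore, PySem.List.index?_eq_idxOf?, hix]
            cases hk : List.idxOf? "#" ps with
            | none => simp [pvBAll, h1, h2]
            | some k => simp [pvBAll, h1, h2]

-- ===== VERDICT (by name: the statement is the Claim_ definition above) =====
theorem topic_match_py_spec : Claim_equal_topic_match_py := by
  intro pattern topic _
  unfold Spec_topic_match_py topic_match_py topic_match_py_alt
  exact pvMain _ _
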